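-- pv_equiv track=rewrite | github.com/s1366560/agi-demos | src/infrastructure/agent/context/policy_registry.py | dedupe_cached_summary_messages
-- ===== SOURCE A (Python) =====
-- from typing import Any
--
-- MessageList = list[dict[str, Any]]
--
-- def dedupe_cached_summary_messages(messages: MessageList) -> MessageList:
--     """Keep only the newest cached-summary system message."""
--     summary_indexes = [
--         idx
--         for idx, msg in enumerate(messages)
--         if msg.get("role") == "system"
--         and isinstance(msg.get("content"), str)
--         and "[Previous conversation summary" in msg.get("content", "")
--     ]
--     if len(summary_indexes) <= 1:
--         return messages
--
--     keep_index = summary_indexes[-1]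
--     return [
--         msg
--         for idx, msg in enumerate(messages)
--         if idx == keep_index or idx not in set(summary_indexes[:-1])
--     ]
-- ===== SOURCE B (Python) =====
-- def dedupe_cached_summary_messages(messages):
--     """Keep only the newest cached-summary system message.
--
--     Single reverse pass: the first summary met (the newest) is kept, every
--     later-met summary is skipped; the accumulated list is reversed at the end.
--     Returns a new list (equality is about the returned value).
--     """
--     out = []
--     kept = False
--     for msg in reversed(messages):
--         content = msg.get("content")
--         if (
--             msg.get("role") == "system"
--             and isinstance(content, str)
--             and "[Previous conversation summary" in content
--         ):
--             if not kept:
--                 out.append(msg)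
--                 kept = True
--         else:
--             out.append(msg)
--     out.reverse()
--     return out
-- ===== Notes on version B (the rewrite author's own statement) =====
-- stated objective: alternative
-- what changed: Replaced A's two-stage index machinery (build list of summary indexes, slice it, filter by membership in an index set) by a single reverse pass with a boolean flag that keeps the first summary encountered (the newest) and skips the rest; no indexes or counting at all.
import Mathlib
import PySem

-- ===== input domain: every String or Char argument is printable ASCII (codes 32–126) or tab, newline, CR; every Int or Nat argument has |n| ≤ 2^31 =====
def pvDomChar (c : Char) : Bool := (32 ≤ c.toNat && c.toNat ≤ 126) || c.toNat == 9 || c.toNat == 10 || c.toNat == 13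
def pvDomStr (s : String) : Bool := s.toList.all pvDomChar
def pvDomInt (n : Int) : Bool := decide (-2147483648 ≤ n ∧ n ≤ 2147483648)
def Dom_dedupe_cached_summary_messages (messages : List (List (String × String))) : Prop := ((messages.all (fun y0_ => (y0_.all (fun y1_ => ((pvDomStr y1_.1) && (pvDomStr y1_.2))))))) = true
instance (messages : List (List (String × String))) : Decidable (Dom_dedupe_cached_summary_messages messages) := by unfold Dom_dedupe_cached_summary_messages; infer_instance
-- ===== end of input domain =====

-- B replaces A's two-stage index machinery (summary-index list, slice, index-set filter) by a
-- single reverse pass with a boolean flag keeping the first summary met (the newest).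
-- Equivalence is about the RETURNED VALUE: A returns the same list object when ≤ 1 summary,
-- B always returns a fresh list; neither mutates its argument.

-- shared helper: the cached-summary test
-- msg.get(k) = first match in the association list (insertion-order dict convention);
-- isinstance(msg.get("content"), str) is "the key is present" (all values are str here)
def isSummary (msg : List (String × String)) : Bool :=
  ((msg.find? (fun p => p.1 == "role")).map (·.2) == some "system")
    && (match (msg.find? (fun p => p.1 == "content")).map (·.2) with
        | some c => PySem.Str.isIn "[Previous conversation summary" c
        | none => false)

-- ===== PORT A =====
def dedupe_cached_summary_messages (messages : List (List (String × String))) : List (List (String × String)) :=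
  let summary_indexes : List Int :=
    (PySem.List.enumerate messages).foldl
      (fun acc p => if isSummary p.2 then acc ++ [p.1] else acc) []
  if summary_indexes.length ≤ 1 then messages
  else
    let keep_index : Int := PySem.List.pyGetD summary_indexes (-1) 0   -- [-1]: list is nonempty here
    let dropSet : PySem.Set Int :=
      PySem.Set.ofList (PySem.List.slice summary_indexes none (some (-1)))
    (PySem.List.enumerate messages).foldl
      (fun acc p =>
        if p.1 == keep_index || !(PySem.Set.contains dropSet p.1) then acc ++ [p.2] else acc) []

-- ===== PORT B =====
def dedupe_cached_summary_messages_alt (messages : List (List (String × String))) : List (List (String × String)) :=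
  (messages.reverse.foldl
    (fun st msg =>
      if isSummary msg then
        if st.1 then st else (true, st.2 ++ [msg])
      else (st.1, st.2 ++ [msg]))
    (false, ([] : List (List (String × String))))).2.reverse

-- ===== PRECONDITION & SPEC =====
def Spec_dedupe_cached_summary_messages (messages : List (List (String × String))) (out : List (List (String × String))) : Prop := out = dedupe_cached_summary_messages_alt messages
instance (messages : List (List (String × String))) (out : List (List (String × String))) : Decidable (Spec_dedupe_cached_summary_messages messages out) := by unfold Spec_dedupe_cached_summary_messages; infer_instance

-- ===== CLAIM (what is proved, stated in full; the proofs are below) =====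
def Claim_equal_dedupe_cached_summary_messages : Prop := ∀ (messages : List (List (String × String))), Dom_dedupe_cached_summary_messages messages → Spec_dedupe_cached_summary_messages messages (dedupe_cached_summary_messages messages)

-- ===== LEMMAS AND PROOFS =====

-- canonical result: keep a summary message only if no later summary exists
def keepLast : List (List (String × String)) → List (List (String × String))
  | [] => []
  | m :: t => if isSummary m && t.any isSummary then keepLast t else m :: keepLast t

theorem countP_pos_iff_any (l : List (List (String × String))) :
    0 < l.countP isSummary ↔ l.any isSummary = true := by
  rw [List.countP_pos_iff, List.any_eq_true]

theorem keepLast_eq_self (l : List (List (String × String)))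
    (h : l.countP isSummary ≤ 1) : keepLast l = l := by
  induction l with
  | nil => rfl
  | cons m t ih =>
    rw [List.countP_cons] at h
    by_cases hm : isSummary m
    · rw [hm] at h; simp only [if_true] at h
      have ht : t.countP isSummary = 0 := by omega
      have hany : t.any isSummary = false := by
        rw [← Bool.not_eq_true, ← countP_pos_iff_any]; omega
      simp [keepLast, hm, hany, ih (by omega)]
    · simp only [hm, if_false, Bool.false_eq_true, Nat.add_zero] at h
      simp [keepLast, hm, ih h]

-- the indices of the summary messages, enumerating from s
def sidx (l : List (List (String × String))) (s : Int) : List Int :=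
  ((PySem.List.enumerate l s).filter (fun q => isSummary q.2)).map (·.1)

theorem sidx_nil (s : Int) : sidx [] s = [] := rfl

theorem sidx_cons (m : List (String × String)) (t : List (List (String × String))) (s : Int) :
    sidx (m :: t) s = if isSummary m then s :: sidx t (s + 1) else sidx t (s + 1) := by
  by_cases hm : isSummary m <;>
    simp [sidx, PySem.List.enumerate_cons, hm]

theorem sidx_ge (l : List (List (String × String))) (s : Int) :
    ∀ i ∈ sidx l s, s ≤ i := by
  induction l generalizing s with
  | nil => simp [sidx_nil]
  | cons m t ih =>
    intro i hi
    rw [sidx_cons] at hi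
    by_cases hm : isSummary m <;> simp [hm] at hi
    · rcases hi with rfl | hi
      · exact le_refl _
      · have := ih (s + 1) i hi; omega
    · have := ih (s + 1) i hi; omega

theorem sidx_length (l : List (List (String × String))) (s : Int) :
    (sidx l s).length = l.countP isSummary := by
  induction l generalizing s with
  | nil => simp [sidx_nil]
  | cons m t ih =>
    rw [sidx_cons, List.countP_cons]
    by_cases hm : isSummary m <;> simp [hm, ih]

theorem sidx_eq_nil_of_not_any (l : List (List (String × String))) (s : Int)
    (h : ¬ l.any isSummary = true) : sidx l s = [] := by
  rw [← List.length_eq_zero_iff, sidx_length]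
  rw [← countP_pos_iff_any] at h; omega

-- A's filtering pass computes keepLast, for any enumeration start
theorem filterA_eq_keepLast (k : Int) (l : List (List (String × String))) :
    ∀ (s : Int) (acc : List (List (String × String))),
    (sidx l s).getLast? = some k →
    (PySem.List.enumerate l s).foldl
      (fun acc p =>
        if p.1 == k || !((sidx l s).dropLast.contains p.1) then acc ++ [p.2] else acc) acc
      = acc ++ keepLast l := by
  induction l with
  | nil => intro s acc hk; simp [sidx_nil] at hk
  | cons m t ih =>
    intro s acc hk
    rw [PySem.List.enumerate_cons]
    by_cases hm : isSummary m
    · have hstruct : sidx (m :: t) s = s :: sidx t (s + 1) := by rw [sidx_cons]; simp [hm]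
      by_cases hany : t.any isSummary = true
      · -- a later summary exists: the head summary is dropped
        have hne' : sidx t (s + 1) ≠ [] := by
          have hl := sidx_length t (s + 1)
          have hpos := (countP_pos_iff_any t).mpr hany
          intro h0; rw [h0] at hl; simp at hl; omega
        obtain ⟨j, X, hX⟩ := List.exists_cons_of_ne_nil hne'
        have hk' : (sidx t (s + 1)).getLast? = some k := by
          rw [hstruct, hX, List.getLast?_cons_cons] at hk; rw [hX]; exact hk
        have hkmem : k ∈ sidx t (s + 1) := List.mem_of_getLast? hk'
        have hks : k ≠ s := by have := sidx_ge t (s + 1) k hkmem; omega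
        have hdl : (sidx (m :: t) s).dropLast = s :: (sidx t (s + 1)).dropLast := by
          rw [hstruct, List.dropLast_cons_of_ne_nil (by rw [hX]; simp)]
        simp only [List.foldl_cons]
        have hsk : (s == k) = false := by
          simp only [beq_eq_false_iff_ne]; exact fun h => hks h.symm
        have hhead :
            (if (s == k || !((sidx (m :: t) s).dropLast.contains s)) = true
             then acc ++ [m] else acc) = acc := by
          rw [hdl, List.contains_cons, hsk]
          simp
        rw [hhead]
        have hbody : ∀ (a : List (List (String × String))) (q : Int × List (String × String)),
            q ∈ PySem.List.enumerate t (s + 1) →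
            (if q.1 == k || !((sidx (m :: t) s).dropLast.contains q.1) then a ++ [q.2] else a)
            = (if q.1 == k || !((sidx t (s + 1)).dropLast.contains q.1) then a ++ [q.2] else a) := by
          intro a q hq
          obtain ⟨n, hn, rfl⟩ := (PySem.List.mem_enumerate_iff _ _ _).mp hq
          have hqs : (s + 1 + (n : Int) == s) = false := by simp only [beq_eq_false_iff_ne]; omega
          rw [hdl, List.contains_cons, hqs]
          simp
        rw [PySem.List.foldl_congr_mem (PySem.List.enumerate t (s + 1)) _
              (fun a (q : Int × List (String × String)) =>
                if q.1 == k || !((sidx t (s + 1)).dropLast.contains q.1) then a ++ [q.2] else a)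
              acc (fun a q hq => hbody a q hq),
            ih (s + 1) acc hk']
        simp [keepLast, hm, hany]
      · -- head is the only (hence last) summary: everything is kept
        have hnil : sidx t (s + 1) = [] := sidx_eq_nil_of_not_any t (s + 1) hany
        have hdl : (sidx (m :: t) s).dropLast = [] := by rw [hstruct, hnil]; rfl
        simp only [List.foldl_cons, hdl]
        have hhead : (if (s == k || !(List.contains ([] : List Int) s)) = true
            then acc ++ [m] else acc) = acc ++ [m] := by simp
        rw [hhead]
        have hbody : ∀ (a : List (List (String × String))) (q : Int × List (String × String)),
            q ∈ PySem.List.enumerate t (s + 1) →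
            (if q.1 == k || !(List.contains ([] : List Int) q.1) then a ++ [q.2] else a)
            = a ++ [q.2] := by intro a q _; simp
        rw [PySem.List.foldl_congr_mem (PySem.List.enumerate t (s + 1)) _
              (fun a (q : Int × List (String × String)) => a ++ [q.2])
              (acc ++ [m]) (fun a q hq => hbody a q hq),
            PySem.List.foldl_append_singleton_eq_map
              (f := fun q : Int × List (String × String) => q.2)
              (l := PySem.List.enumerate t (s + 1)) (acc := acc ++ [m]),
            PySem.List.map_snd_enumerate]
        have hkt : keepLast t = t := by
          apply keepLast_eq_self
          have := sidx_length t (s + 1); rw [hnil] at this; simp at this; omega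
        simp [keepLast, hm, hany, hkt]
    · -- non-summary head: kept, and the index data is that of the tail
      have hstruct : sidx (m :: t) s = sidx t (s + 1) := by rw [sidx_cons]; simp [hm]
      have hk' : (sidx t (s + 1)).getLast? = some k := hstruct ▸ hk
      have hsmem : s ∉ (sidx (m :: t) s).dropLast := by
        intro h
        have h2 : s ∈ sidx t (s + 1) := by
          rw [hstruct] at h; exact List.dropLast_subset _ h
        have := sidx_ge t (s + 1) s h2; omega
      have hsk : (s == k) = false := by
        have := sidx_ge t (s + 1) k (List.mem_of_getLast? hk')
        simp only [beq_eq_false_iff_ne]; omega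
      simp only [List.foldl_cons]
      have hhead :
          (if (s == k || !((sidx (m :: t) s).dropLast.contains s)) = true
           then acc ++ [m] else acc) = acc ++ [m] := by
        simp [hsmem, hsk]
      rw [hhead, hstruct, ih (s + 1) (acc ++ [m]) hk']
      simp [keepLast, hm]

-- B side: the reverse pass as a structural recursion
def revKeep : Bool → List (List (String × String)) → List (List (String × String))
  | _, [] => []
  | kept, m :: t =>
    if isSummary m then (if kept then revKeep kept t else m :: revKeep true t)
    else m :: revKeep kept t

theorem foldB_eq_revKeep (l : List (List (String × String))) :
    ∀ (kept : Bool) (acc : List (List (String × String))),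
    (l.foldl
      (fun st msg =>
        if isSummary msg then
          if st.1 then st else (true, st.2 ++ [msg])
        else (st.1, st.2 ++ [msg]))
      (kept, acc)).2 = acc ++ revKeep kept l := by
  induction l with
  | nil => intro kept acc; simp [revKeep]
  | cons m t ih =>
    intro kept acc
    by_cases hm : isSummary m
    · cases kept <;> simp [List.foldl_cons, hm, revKeep, ih]
    · simp [List.foldl_cons, hm, revKeep, ih]

theorem revKeep_append_singleton (xs : List (List (String × String)))
    (m : List (String × String)) :
    ∀ kept : Bool,
    revKeep kept (xs ++ [m])
      = revKeep kept xs
          ++ (if isSummary m && (kept || xs.any isSummary) then [] else [m]) := by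
  induction xs with
  | nil => intro kept; cases kept <;> by_cases hm : isSummary m <;> simp [revKeep, hm]
  | cons x t ih =>
    intro kept
    by_cases hx : isSummary x
    · cases kept <;> simp [revKeep, hx, ih]
    · simp [revKeep, hx, ih]

theorem revKeep_reverse_eq_keepLast (l : List (List (String × String))) :
    (revKeep false l.reverse).reverse = keepLast l := by
  induction l with
  | nil => rfl
  | cons m t ih =>
    rw [List.reverse_cons, revKeep_append_singleton t.reverse m false,
        List.reverse_append]
    by_cases hcond : (isSummary m && t.any isSummary) = true
    · have : (isSummary m && (false || t.reverse.any isSummary)) = true := by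
        simpa [List.any_reverse] using hcond
      rw [this]
      simp [keepLast, hcond, ih]
    · have : (isSummary m && (false || t.reverse.any isSummary)) = false := by
        have hc := eq_false_of_ne_true hcond
        simpa [List.any_reverse] using hc
      rw [this]
      simp [keepLast, hcond, ih]

theorem contains_ofList_int (X : List Int) (i : Int) :
    PySem.Set.contains (PySem.Set.ofList X) i = X.contains i := by
  by_cases h : i ∈ X
  · have h2 : i ∈ PySem.Set.ofList X := (PySem.Set.mem_ofList X i).mpr h
    simp [PySem.Set.contains_eq_listContains, List.contains_eq_mem, h, h2]
  · have h2 : i ∉ PySem.Set.ofList X := fun hc => h ((PySem.Set.mem_ofList X i).mp hc)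
    simp [PySem.Set.contains_eq_listContains, List.contains_eq_mem, h, h2]

theorem countA_eq_sidx (messages : List (List (String × String))) :
    ((PySem.List.enumerate messages).foldl
      (fun acc p => if isSummary p.2 then acc ++ [p.1] else acc) ([] : List Int))
      = sidx messages 0 := by
  rw [PySem.List.foldl_append_if
        (p := fun q : Int × List (String × String) => isSummary q.2)
        (f := fun q : Int × List (String × String) => q.1)
        (l := PySem.List.enumerate messages) (acc := [])]
  rfl

-- both programs compute keepLast
theorem A_eq_keepLast (messages : List (List (String × String))) :
    dedupe_cached_summary_messages messages = keepLast messages := by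
  unfold dedupe_cached_summary_messages
  rw [countA_eq_sidx]
  by_cases hle : (sidx messages 0).length ≤ 1
  · rw [if_pos hle, keepLast_eq_self messages (by rw [← sidx_length messages 0]; exact hle)]
  · rw [if_neg hle]
    have hne : sidx messages 0 ≠ [] := by
      intro h; rw [h] at hle; exact hle (by simp)
    obtain ⟨k, hk⟩ : ∃ k, (sidx messages 0).getLast? = some k := by
      rcases h : (sidx messages 0).getLast? with _ | k
      · exact absurd (List.getLast?_eq_none_iff.mp h) hne
      · exact ⟨k, rfl⟩
    have hkeep : PySem.List.pyGetD (sidx messages 0) (-1) 0 = k := by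
      simp [PySem.List.pyGetD, PySem.List.pyGet?_neg_one, hk]
    have hbody : ∀ (a : List (List (String × String))) (q : Int × List (String × String)),
        q ∈ PySem.List.enumerate messages 0 →
        (if q.1 == PySem.List.pyGetD (sidx messages 0) (-1) 0
             || !(PySem.Set.contains
                   (PySem.Set.ofList (PySem.List.slice (sidx messages 0) none (some (-1)))) q.1)
         then a ++ [q.2] else a)
        = (if q.1 == k || !((sidx messages 0).dropLast.contains q.1) then a ++ [q.2] else a) := by
      intro a q _
      rw [hkeep, PySem.List.slice_to_neg_one, contains_ofList_int]
    rw [PySem.List.foldl_congr_mem (PySem.List.enumerate messages 0) _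
          (fun a (q : Int × List (String × String)) =>
            if q.1 == k || !((sidx messages 0).dropLast.contains q.1) then a ++ [q.2] else a)
          [] (fun a q hq => hbody a q hq),
        filterA_eq_keepLast k messages 0 [] hk]
    rfl

theorem B_eq_keepLast (messages : List (List (String × String))) :
    dedupe_cached_summary_messages_alt messages = keepLast messages := by
  unfold dedupe_cached_summary_messages_alt
  rw [foldB_eq_revKeep messages.reverse false [], List.nil_append,
      revKeep_reverse_eq_keepLast]

-- ===== VERDICT (by name: the statement is the Claim_ definition above) =====
theorem dedupe_cached_summary_messages_spec : Claim_equal_dedupe_cached_summary_messages := by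
  intro messages _
  unfold Spec_dedupe_cached_summary_messages
  rw [A_eq_keepLast, B_eq_keepLast]
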